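-- pv_equiv track=rewrite | github.com/jk-jung/problem-solving | codewars/5kyu/5_Mirrored Exponential Chunks.py | mirrored_exponential_chunks
-- ===== SOURCE A (Python) =====
-- def mirrored_exponential_chunks(v):
--     if len(v) == 0: return v
--     n = len(v) // 2
--     a = v[n::-1]
--     b = v[n:]
--
--     r = []
--     if len(a) == len(b):
--         r.append([a[0]])
--         a = a[1:]
--         b = b[1:]
--     else:
--         a = a[1:]
--
--     m = 1
--     while len(a) > 0:
--         m *= 2
--         r.append(b[:m])
--         r = [a[:m][::-1]] + r
--
--         a = a[m:]
--         b = b[m:]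
--
--     return r
-- ===== SOURCE B (Python) =====
-- def mirrored_exponential_chunks(v):
--     if not v:
--         return v
--     mid = len(v) // 2
--     odd = len(v) % 2
--     # chunk boundaries 0, 2, 6, 14, ... clamped at mid (half length)
--     bounds = [0]
--     size = 2
--     while bounds[-1] < mid:
--         bounds.append(min(bounds[-1] + size, mid))
--         size *= 2
--     pairs = list(zip(bounds, bounds[1:]))
--     lefts = [v[mid - y:mid - x] for x, y in pairs]
--     rights = [v[mid + odd + x:mid + odd + y] for x, y in pairs]
--     center = [[v[mid]]] if odd else []
--     return lefts[::-1] + center + rights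
-- ===== Notes on version B (the rewrite author's own statement) =====
-- stated objective: simpler
-- what changed: A reverse-slices the first half and repeatedly mutates/shrinks four pieces of state in a while loop, prepending and appending as it goes; B computes the clamped chunk-boundary list 0,2,6,14,...,mid once and builds the left pieces, the optional center and the right pieces directly as slice comprehensions over the original list (reversed-lefts + center + rights), so the shrinking halves are never re-copied.
import Mathlib
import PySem

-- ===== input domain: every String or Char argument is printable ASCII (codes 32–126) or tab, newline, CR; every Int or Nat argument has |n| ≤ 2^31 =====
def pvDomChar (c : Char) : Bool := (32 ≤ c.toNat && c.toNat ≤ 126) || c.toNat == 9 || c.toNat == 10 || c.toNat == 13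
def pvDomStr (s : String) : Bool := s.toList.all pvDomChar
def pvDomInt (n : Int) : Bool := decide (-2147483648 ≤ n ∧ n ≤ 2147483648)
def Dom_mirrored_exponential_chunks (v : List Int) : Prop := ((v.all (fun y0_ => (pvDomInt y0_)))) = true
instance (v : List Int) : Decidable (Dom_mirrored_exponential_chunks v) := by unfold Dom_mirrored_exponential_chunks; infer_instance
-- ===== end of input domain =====

-- B replaces A's four-piece shrinking while loop by a precomputed boundary list and direct slice
-- comprehensions over the original list (objective: simpler).

-- ===== PORT A =====
-- the while loop: state (m, a, b, r); fuel = a.length suffices since each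
-- iteration drops at least 2 elements of a (m*2 ≥ 2)
def pvLoopA : Nat → Int → List Int → List Int → List (List Int) → List (List Int)
  | 0, _, _, _, r => r
  | fuel + 1, m, a, b, r =>
    if a.length > 0 then
      let m' := m * 2
      let r' := r ++ [PySem.List.slice b none (some m')]
      -- a[:m][::-1]: step -1 ≠ 0, slice? is never none
      let r'' := [(PySem.List.slice? (PySem.List.slice a none (some m')) none none (-1)).getD []] ++ r'
      pvLoopA fuel m' (PySem.List.slice a (some m') none) (PySem.List.slice b (some m') none) r''
    else r

def mirrored_exponential_chunks (v : List Int) : List (List Int) :=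
  if v.length = 0 then []                                    -- Python returns v, here the empty list
  else
    let n : Int := PySem.Int.floordiv (v.length : Int) 2
    -- v[n::-1]: step -1 ≠ 0, slice? is never none
    let a := (PySem.List.slice? v (some n) none (-1)).getD []
    let b := PySem.List.slice v (some n) none
    let r : List (List Int) := []
    if a.length = b.length then
      let r' := r ++ [[(PySem.List.pyGet? a 0).getD 0]]      -- a[0]; a has length n+1 ≥ 1
      let a' := PySem.List.slice a (some 1) none
      let b' := PySem.List.slice b (some 1) none
      pvLoopA a'.length 1 a' b' r'
    else
      let a' := PySem.List.slice a (some 1) none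
      pvLoopA a'.length 1 a' b r

-- ===== PORT B =====
-- the boundary-building while loop of Source B: appends min(last+size, mid) while last < mid;
-- fuel = mid suffices since last grows by at least 1 per step
def pvBoundsGo : Nat → Nat → Nat → Nat → List Nat
  | 0, _, _, _ => []
  | fuel + 1, last, size, mid =>
    if last < mid then (min (last + size) mid) :: pvBoundsGo fuel (min (last + size) mid) (size * 2) mid
    else []

def mirrored_exponential_chunks_alt (v : List Int) : List (List Int) :=
  if v = [] then []                                          -- Python returns v, here the empty list
  else
    let mid := v.length / 2
    let odd := v.length % 2
    let bounds := 0 :: pvBoundsGo mid 0 2 mid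
    let pairs := bounds.zip bounds.tail
    let lefts := pairs.map (fun p =>
      PySem.List.slice v (some ((mid : Int) - (p.2 : Int))) (some ((mid : Int) - (p.1 : Int))))
    let rights := pairs.map (fun p =>
      PySem.List.slice v (some ((mid : Int) + (odd : Int) + (p.1 : Int))) (some ((mid : Int) + (odd : Int) + (p.2 : Int))))
    let center := if odd = 1 then [[(PySem.List.pyGet? v (mid : Int)).getD 0]] else []
    lefts.reverse ++ center ++ rights

-- ===== PRECONDITION & SPEC =====
def Spec_mirrored_exponential_chunks (v : List Int) (out : List (List Int)) : Prop := out = mirrored_exponential_chunks_alt v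
instance (v : List Int) (out : List (List Int)) : Decidable (Spec_mirrored_exponential_chunks v out) := by unfold Spec_mirrored_exponential_chunks; infer_instance

-- ===== CLAIM (what is proved, stated in full; the proofs are below) =====
def Claim_equal_mirrored_exponential_chunks : Prop := ∀ (v : List Int), Dom_mirrored_exponential_chunks v → Spec_mirrored_exponential_chunks v (mirrored_exponential_chunks v)

-- ===== LEMMAS AND PROOFS =====

-- canonical chunk list: sizes 2^(j+1), 2^(j+2), … over xs
def pvChunks (j : Nat) (xs : List Int) : List (List Int) :=
  if h : xs = [] then [] else xs.take (2 ^ (j + 1)) :: pvChunks (j + 1) (xs.drop (2 ^ (j + 1)))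
termination_by xs.length
decreasing_by
  have hx : 0 < xs.length := List.length_pos_iff.mpr h
  simp [List.length_drop]; omega

theorem pvLoopA_eq (fuel : Nat) : ∀ (j : Nat) (a b : List Int) (r : List (List Int)),
    a.length = b.length → a.length ≤ fuel →
    pvLoopA fuel ((2 : Int) ^ j) a b r
      = ((pvChunks j a).map List.reverse).reverse ++ r ++ pvChunks j b := by
  induction fuel with
  | zero =>
    intro j a b r hlen hf
    have ha : a = [] := List.length_eq_zero_iff.mp (Nat.le_zero.mp hf)
    have hb : b = [] := List.length_eq_zero_iff.mp (by omega)
    subst ha; subst hb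
    simp [pvLoopA, pvChunks]
  | succ fuel ih =>
    intro j a b r hlen hf
    by_cases ha : a = []
    · have hb : b = [] := List.length_eq_zero_iff.mp (by simp [ha] at hlen; omega)
      subst ha; subst hb
      simp [pvLoopA, pvChunks]
    · have hal : 0 < a.length := List.length_pos_iff.mpr ha
      have hb : b ≠ [] := List.length_pos_iff.mp (hlen ▸ hal)
      have hM : 2 ≤ 2 ^ (j + 1) := by
        calc 2 = 2 ^ 1 := by norm_num
        _ ≤ 2 ^ (j + 1) := Nat.pow_le_pow_right (by norm_num) (by omega)
      have hm : (2 : Int) ^ j * 2 = ((2 ^ (j + 1) : Nat) : Int) := by push_cast [pow_succ]; ring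
      have hlen2 : (a.drop (2 ^ (j + 1))).length = (b.drop (2 ^ (j + 1))).length := by
        simp [hlen]
      have hfu : (a.drop (2 ^ (j + 1))).length ≤ fuel := by
        rw [List.length_drop]; omega
      rw [pvLoopA, if_pos hal]
      simp only [hm, PySem.List.slice_to_natCast, PySem.List.slice_from_natCast,
        PySem.List.slice?_none_none_neg_one, Option.getD_some]
      have hcast : ((2 ^ (j + 1) : Nat) : Int) = (2 : Int) ^ (j + 1) := by push_cast; ring
      rw [hcast, ih (j + 1) (a.drop (2 ^ (j + 1))) (b.drop (2 ^ (j + 1))) _ hlen2 hfu]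
      have hA : pvChunks j a = a.take (2 ^ (j + 1)) :: pvChunks (j + 1) (a.drop (2 ^ (j + 1))) := by
        rw [pvChunks]; exact dif_neg ha
      have hB : pvChunks j b = b.take (2 ^ (j + 1)) :: pvChunks (j + 1) (b.drop (2 ^ (j + 1))) := by
        rw [pvChunks]; exact dif_neg hb
      rw [hA, hB]
      simp [List.append_assoc]

theorem pairs_mem (fuel : Nat) : ∀ (last size k : Nat) (p : Nat × Nat),
    p ∈ (last :: pvBoundsGo fuel last size k).zip (pvBoundsGo fuel last size k) →
    last ≤ p.1 ∧ p.1 ≤ p.2 ∧ p.2 ≤ k := by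
  induction fuel with
  | zero => intro last size k p hp; simp [pvBoundsGo] at hp
  | succ fuel ih =>
    intro last size k p hp
    by_cases h : last < k
    · simp only [pvBoundsGo, if_pos h, List.zip_cons_cons, List.mem_cons] at hp
      rcases hp with hp | hp
      · subst hp
        exact ⟨le_refl _, le_min (Nat.le_add_right _ _) (le_of_lt h), min_le_right _ _⟩
      · have := ih (min (last + size) k) (size * 2) k p hp
        exact ⟨le_trans (le_min (Nat.le_add_right _ _) (le_of_lt h)) this.1, this.2.1, this.2.2⟩
    · simp [pvBoundsGo, if_neg h] at hp

-- the zipped boundary pairs, mapped through drop/take, are exactly pvChunks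
theorem pairs_chunks (fuel : Nat) : ∀ (j last : Nat) (R : List Int),
    last ≤ R.length → R.length - last ≤ fuel →
    ((last :: pvBoundsGo fuel last (2 ^ (j + 1)) R.length).zip (pvBoundsGo fuel last (2 ^ (j + 1)) R.length)).map
        (fun p => (R.drop p.1).take (p.2 - p.1))
      = pvChunks j (R.drop last) := by
  induction fuel with
  | zero =>
    intro j last R hlast hf
    have hlast' : last = R.length := by omega
    simp [pvBoundsGo, pvChunks, List.drop_eq_nil_of_le (le_of_eq hlast'.symm)]
  | succ fuel ih =>
    intro j last R hlast hf
    by_cases h : last < R.length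
    · have hM : 2 ≤ 2 ^ (j + 1) := by
        calc 2 = 2 ^ 1 := by norm_num
        _ ≤ 2 ^ (j + 1) := Nat.pow_le_pow_right (by norm_num) (by omega)
      have hpow : 2 ^ (j + 1) * 2 = 2 ^ (j + 1 + 1) := by ring
      have hb' : min (last + 2 ^ (j + 1)) R.length ≤ R.length := min_le_right _ _
      have hfu : R.length - min (last + 2 ^ (j + 1)) R.length ≤ fuel := by omega
      have hne : R.drop last ≠ [] := by
        intro hcon
        have := List.drop_eq_nil_iff.mp hcon
        omega
      rw [pvBoundsGo, if_pos h]
      simp only [List.zip_cons_cons, List.map_cons, hpow]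
      rw [ih (j + 1) (min (last + 2 ^ (j + 1)) R.length) R hb' hfu]
      have hchunk : pvChunks j (R.drop last)
          = (R.drop last).take (2 ^ (j + 1)) :: pvChunks (j + 1) ((R.drop last).drop (2 ^ (j + 1))) := by
        rw [pvChunks]; exact dif_neg hne
      rw [hchunk]
      congr 1
      · -- heads agree: take clamps at the remaining length
        rcases Nat.lt_or_ge R.length (last + 2 ^ (j + 1)) with hlt | hle
        · rw [min_eq_right (le_of_lt hlt)]
          rw [List.take_of_length_le (by simp), List.take_of_length_le (by simp; omega)]
        · rw [min_eq_left hle]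
          congr 1; omega
      · -- tails agree: drop past the end is []
        congr 1
        rcases Nat.lt_or_ge R.length (last + 2 ^ (j + 1)) with hlt | hle
        · rw [min_eq_right (le_of_lt hlt), List.drop_drop]
          rw [List.drop_eq_nil_of_le (by simp), List.drop_eq_nil_of_le (by omega)]
        · rw [min_eq_left hle, List.drop_drop]
    · have hlast' : last = R.length := by omega
      rw [pvBoundsGo, if_neg h]
      simp [pvChunks, List.drop_eq_nil_of_le (le_of_eq hlast'.symm)]

theorem pvSliceRev (v : List Int) (n : Nat) (h : n < v.length) :
    PySem.List.slice? v (some (n : Int)) none (-1) = some ((v.take (n + 1)).reverse) := by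
  unfold PySem.List.slice? PySem.List.sliceIndices
  norm_num
  rw [if_neg (by omega : ¬((n : Int) < 0)), min_eq_left (by omega : (n : Int) ≤ (v.length : Int) - 1),
      if_pos (by omega : (-1 : Int) < (n : Int)), (by omega : ((n : Int) + 1).toNat = n + 1)]
  rw [List.filterMap_congr (g := fun x => some (v.getD (n - x) 0)) ?_]
  · rw [show (fun x => some (v.getD (n - x) 0)) = some ∘ (fun x => v.getD (n - x) 0) from rfl,
       List.filterMap_eq_map]
    apply List.ext_getElem
    · simp; omega
    · intro i h1 h2
      simp at h1 h2 ⊢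
      rw [List.getElem?_eq_getElem (by omega)]
      simp
      congr 1
      omega
  · intro x hx
    simp [List.mem_range] at hx
    rw [show ((n : Int) + -(x : Int)).toNat = n - x by omega]
    rw [List.getElem?_eq_getElem (by omega)]
    simp [List.getD_eq_getElem?_getD, List.getElem?_eq_getElem (by omega : n - x < v.length)]

theorem A_eval (v : List Int) (hv : v ≠ []) :
    mirrored_exponential_chunks v =
      ((pvChunks 0 ((v.take (v.length / 2)).reverse)).map List.reverse).reverse
        ++ (if v.length % 2 = 1 then [[v.getD (v.length / 2) 0]] else [])
        ++ pvChunks 0 (v.drop (v.length / 2 + v.length % 2)) := by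
  have hlen : 0 < v.length := List.length_pos_iff.mpr hv
  have hmidlt : v.length / 2 < v.length := Nat.div_lt_self hlen (by norm_num)
  have hn : PySem.Int.floordiv (v.length : Int) 2 = ((v.length / 2 : Nat) : Int) := by
    exact_mod_cast PySem.Int.floordiv_natCast v.length 2
  have htake : v.take (v.length / 2 + 1) = v.take (v.length / 2) ++ [v.getD (v.length / 2) 0] := by
    rw [List.take_add_one, List.getElem?_eq_getElem hmidlt]
    simp [List.getD]
    rw [List.getElem?_eq_getElem hmidlt]
    simp
  rw [mirrored_exponential_chunks, if_neg (by omega)]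
  simp only [hn, pvSliceRev v (v.length / 2) hmidlt, Option.getD_some,
    PySem.List.slice_from_natCast, htake, List.reverse_append, List.reverse_singleton,
    List.singleton_append, List.length_cons, List.length_reverse, List.length_take,
    List.length_drop, PySem.List.slice_from_one, List.tail_cons, List.tail_drop]
  rw [min_eq_left hmidlt.le]
  have hget : ∀ (x : Int) (l : List Int), (PySem.List.pyGet? (x :: l) 0).getD 0 = x := by
    intro x l; simp [PySem.List.pyGet?, PySem.List.pyIdx?]
  have h20 : (1 : Int) = 2 ^ 0 := by norm_num
  rcases Nat.mod_two_eq_zero_or_one v.length with hp | hp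
  · rw [if_neg (by omega), hp, h20,
      pvLoopA_eq (v.length / 2) 0 _ _ _ (by simp; omega) (by simp)]
    simp
  · rw [if_pos (by omega), hp, hget, h20,
      pvLoopA_eq (v.length / 2) 0 _ _ _ (by simp; omega) (by simp)]
    simp

theorem B_eval (v : List Int) (hv : v ≠ []) :
    mirrored_exponential_chunks_alt v =
      ((pvChunks 0 ((v.take (v.length / 2)).reverse)).map List.reverse).reverse
        ++ (if v.length % 2 = 1 then [[v.getD (v.length / 2) 0]] else [])
        ++ pvChunks 0 (v.drop (v.length / 2 + v.length % 2)) := by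
  have hlen : 0 < v.length := List.length_pos_iff.mpr hv
  have hmidlt : v.length / 2 < v.length := Nat.div_lt_self hlen (by norm_num)
  set mid := v.length / 2 with hmid
  set odd := v.length % 2 with hodd
  have hpar : v.length = 2 * mid + odd := by omega
  have hR : (v.drop (mid + odd)).length = mid := by simp; omega
  have hL : ((v.take mid).reverse).length = mid := by simp; omega
  rw [mirrored_exponential_chunks_alt, if_neg hv]
  simp only []
  have hrights : (((0 :: pvBoundsGo mid 0 2 mid).zip (pvBoundsGo mid 0 2 mid)).map (fun p =>
      PySem.List.slice v (some ((mid : Int) + (odd : Int) + (p.1 : Int))) (some ((mid : Int) + (odd : Int) + (p.2 : Int)))))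
      = pvChunks 0 (v.drop (mid + odd)) := by
    rw [List.map_congr_left (g := fun p => ((v.drop (mid + odd)).drop p.1).take (p.2 - p.1)) ?_]
    · have hb2 : pvBoundsGo mid 0 2 mid = pvBoundsGo mid 0 (2 ^ (0 + 1)) (v.drop (mid + odd)).length := by
        rw [hR]; norm_num
      rw [hb2, pairs_chunks mid 0 0 _ (Nat.zero_le _) (by omega), List.drop_zero]
    · intro p hp
      have h1 : ((mid : Int) + (odd : Int) + (p.1 : Int)) = ((mid + odd + p.1 : Nat) : Int) := by push_cast; ring
      have h2 : ((mid : Int) + (odd : Int) + (p.2 : Int)) = ((mid + odd + p.2 : Nat) : Int) := by push_cast; ring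
      show _ = (((v.drop (mid + odd)).drop p.1).take (p.2 - p.1))
      rw [h1, h2, PySem.List.slice_natCast, List.drop_drop,
        show mid + odd + p.2 - (mid + odd + p.1) = p.2 - p.1 by omega]
  have hlefts : (((0 :: pvBoundsGo mid 0 2 mid).zip (pvBoundsGo mid 0 2 mid)).map (fun p =>
      PySem.List.slice v (some ((mid : Int) - (p.2 : Int))) (some ((mid : Int) - (p.1 : Int)))))
      = (pvChunks 0 ((v.take mid).reverse)).map List.reverse := by
    rw [List.map_congr_left
      (g := (fun p => (((((v.take mid).reverse).drop p.1).take (p.2 - p.1)).reverse)) ) ?_]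
    · have hb3 : pvBoundsGo mid 0 2 mid = pvBoundsGo mid 0 (2 ^ (0 + 1)) ((v.take mid).reverse).length := by
        rw [hL]; norm_num
      rw [show (fun p : Nat × Nat => (((((v.take mid).reverse).drop p.1).take (p.2 - p.1)).reverse))
            = List.reverse ∘ (fun p : Nat × Nat => ((((v.take mid).reverse).drop p.1).take (p.2 - p.1))) from rfl,
          ← List.map_map, hb3, pairs_chunks mid 0 0 _ (Nat.zero_le _) (by omega), List.drop_zero]
    · intro p hp
      obtain ⟨-, h12, h2m⟩ := pairs_mem mid 0 2 mid p hp
      have h1 : ((mid : Int) - (p.2 : Int)) = ((mid - p.2 : Nat) : Int) := by push_cast [Nat.cast_sub h2m]; ring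
      have h2 : ((mid : Int) - (p.1 : Int)) = ((mid - p.1 : Nat) : Int) := by push_cast [Nat.cast_sub (le_trans h12 h2m)]; ring
      show _ = ((((v.take mid).reverse).drop p.1).take (p.2 - p.1)).reverse
      have hLT : (v.take mid).length = mid := by simp; omega
      rw [h1, h2, PySem.List.slice_natCast]
      rw [List.drop_reverse, List.take_reverse, List.reverse_reverse, hLT]
      simp only [List.take_take, List.drop_take, List.length_take]
      congr 1 <;> first | omega | (congr 1; omega)
  rw [List.tail_cons, hlefts, hrights]
  simp [List.getD, List.append_assoc]
  rw [show ((v.length : Int) / 2) = ((mid : Nat) : Int) from by omega, PySem.List.pyGet?_natCast, ← hodd]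

-- ===== VERDICT (by name: the statement is the Claim_ definition above) =====
theorem mirrored_exponential_chunks_spec : Claim_equal_mirrored_exponential_chunks := by
  intro v _
  unfold Spec_mirrored_exponential_chunks
  by_cases hv : v = []
  · subst hv
    simp [mirrored_exponential_chunks, mirrored_exponential_chunks_alt]
  · rw [A_eval v hv, B_eval v hv]
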